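-- pv_equiv track=rewrite | github.com/Sal-Omon/Sal-Omon.github.io | beniCulturali_Backend/webapp/app/seeders/seed_images.py | _ensure_total_list
-- ===== SOURCE A (Python) =====
-- from typing import List, Optional
--
-- def _ensure_total_list(source_list: List[str], total: Optional[int]) -> List[str]:
--     if total is None or total <= 0:
--         return list(source_list)
--     if not source_list:
--         return []
--     #ripeti la lisata finchè non si raggiunge la lunghezza richiesta
--     out = []
--     while len(out) < total:
--         out.extend(source_list)
--     return out[:total]
-- ===== SOURCE B (Python) =====
-- from typing import List, Optional
--
-- def _ensure_total_list(source_list: List[str], total: Optional[int]) -> List[str]: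
--     if total is None or total <= 0:
--         return list(source_list)
--     if not source_list:
--         return []
--     k = -(-total // len(source_list))  # ceil(total / len)
--     return (source_list * k)[:total]
-- ===== Notes on version B (the rewrite author's own statement) =====
-- stated objective: simpler
-- what changed: Replaces the accumulate-until-length while loop with a closed-form ceiling-division repeat count, one list multiplication and a single slice.
import Mathlib
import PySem

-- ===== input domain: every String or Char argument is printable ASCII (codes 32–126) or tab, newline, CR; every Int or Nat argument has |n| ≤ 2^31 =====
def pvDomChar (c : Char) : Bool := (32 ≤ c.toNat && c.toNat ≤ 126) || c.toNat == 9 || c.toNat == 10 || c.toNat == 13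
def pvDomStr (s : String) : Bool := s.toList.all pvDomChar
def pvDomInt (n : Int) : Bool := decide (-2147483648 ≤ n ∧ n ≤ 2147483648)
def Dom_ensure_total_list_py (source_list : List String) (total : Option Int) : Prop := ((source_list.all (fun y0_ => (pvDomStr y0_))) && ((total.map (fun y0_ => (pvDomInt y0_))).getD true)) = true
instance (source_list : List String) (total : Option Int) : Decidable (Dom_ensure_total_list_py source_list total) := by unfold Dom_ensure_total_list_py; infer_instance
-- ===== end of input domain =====

-- B replaces A's accumulate-until-length while loop by a closed-form ceiling-division
-- repeat count plus one slice (objective: simpler). Return values only; A mutates nothing.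

-- ===== PORT A =====
-- the 'while len(out) < total: out.extend(source_list)' loop; hxs (source_list nonempty,
-- guaranteed by the guard before the loop in A) only justifies termination
def ensure_total_list_loopA (xs : List String) (hxs : xs ≠ []) (total : Int)
    (out : List String) : List String :=
  if (out.length : Int) < total then ensure_total_list_loopA xs hxs total (out ++ xs) else out
  termination_by (total - out.length).toNat
  decreasing_by
    have hpos : 0 < xs.length := List.length_pos_iff.mpr hxs
    simp only [List.length_append]
    omega

def ensure_total_list_py (source_list : List String) (total : Option Int) : List String :=
  match total with
  | none => source_list            -- 'total is None … return list(source_list)'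
  | some t =>
    if t ≤ 0 then source_list
    else if h : source_list = [] then []
    else PySem.List.slice (ensure_total_list_loopA source_list h t []) none (some t)  -- out[:total]

-- ===== PORT B =====
-- source_list * k, ported by hand as k left-to-right appended copies
def ensure_total_list_repeatN (xs : List String) : Nat → List String
  | 0 => []
  | n + 1 => xs ++ ensure_total_list_repeatN xs n

def ensure_total_list_py_alt (source_list : List String) (total : Option Int) : List String :=
  match total with
  | none => source_list
  | some t =>
    if t ≤ 0 then source_list
    else if source_list = [] then []
    else
      let k : Int := -(PySem.Int.floordiv (-t) (source_list.length : Int))  -- k = -(-total // len)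
      PySem.List.slice (ensure_total_list_repeatN source_list k.toNat) none (some t)  -- (…)[:total]

-- ===== PRECONDITION & SPEC =====
def Spec_ensure_total_list_py (source_list : List String) (total : Option Int) (out : List String) : Prop := out = ensure_total_list_py_alt source_list total
instance (source_list : List String) (total : Option Int) (out : List String) : Decidable (Spec_ensure_total_list_py source_list total out) := by unfold Spec_ensure_total_list_py; infer_instance

-- ===== CLAIM (what is proved, stated in full; the proofs are below) =====
def Claim_equal_ensure_total_list_py : Prop := ∀ (source_list : List String) (total : Option Int), Dom_ensure_total_list_py source_list total → Spec_ensure_total_list_py source_list total (ensure_total_list_py source_list total)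

-- ===== LEMMAS AND PROOFS =====

theorem repeatN_length (xs : List String) (n : Nat) :
    (ensure_total_list_repeatN xs n).length = n * xs.length := by
  induction n with
  | zero => simp [ensure_total_list_repeatN]
  | succ n ih => simp [ensure_total_list_repeatN, ih]; ring

theorem repeatN_add (xs : List String) (m n : Nat) :
    ensure_total_list_repeatN xs (m + n) =
      ensure_total_list_repeatN xs m ++ ensure_total_list_repeatN xs n := by
  induction m with
  | zero => simp [ensure_total_list_repeatN]
  | succ m ih =>
      have : m + 1 + n = (m + n) + 1 := by omega
      rw [this]
      simp [ensure_total_list_repeatN, ih]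

-- any two sufficiently long repetitions agree on a prefix
theorem take_repeatN_eq (xs : List String) (t m k : Nat)
    (hm : t ≤ m * xs.length) (hk : t ≤ k * xs.length) :
    (ensure_total_list_repeatN xs m).take t = (ensure_total_list_repeatN xs k).take t := by
  rcases Nat.le_total m k with h | h
  · obtain ⟨d, rfl⟩ := Nat.exists_eq_add_of_le h
    rw [repeatN_add, List.take_append_of_le_length (by rw [repeatN_length]; exact hm)]
  · obtain ⟨d, rfl⟩ := Nat.exists_eq_add_of_le h
    rw [repeatN_add, List.take_append_of_le_length (by rw [repeatN_length]; exact hk)]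

-- the while loop appends whole copies of xs until the length reaches total
theorem loopA_spec (xs : List String) (hxs : xs ≠ []) (t : Int) :
    ∀ out, ∃ m, ensure_total_list_loopA xs hxs t out = out ++ ensure_total_list_repeatN xs m ∧
      t ≤ (out.length : Int) + (m : Int) * xs.length := by
  intro out
  have hpos : 0 < xs.length := List.length_pos_iff.mpr hxs
  generalize hfuel : (t - out.length).toNat = n
  induction n using Nat.strong_induction_on generalizing out with
  | _ n ih =>
    rw [ensure_total_list_loopA]
    split
    · next hlt =>
      obtain ⟨m, hm, hle⟩ := ih (t - (out ++ xs).length).toNat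
        (by simp only [List.length_append] at *; omega) (out ++ xs) rfl
      refine ⟨m + 1, ?_, ?_⟩
      · rw [hm]
        simp [ensure_total_list_repeatN, List.append_assoc]
      · simp only [List.length_append] at hle
        push_cast at hle ⊢
        nlinarith
    · next hge =>
      exact ⟨0, by simp [ensure_total_list_repeatN], by push_cast; omega⟩

-- ===== VERDICT (by name: the statement is the Claim_ definition above) =====
theorem ensure_total_list_py_spec : Claim_equal_ensure_total_list_py := by
  intro xs total _
  unfold Spec_ensure_total_list_py ensure_total_list_py ensure_total_list_py_alt
  match total with
  | none => rfl
  | some t =>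
    by_cases ht : t ≤ 0
    · simp [ht]
    · by_cases hnil : xs = []
      · simp [hnil, ht]
      · simp only [if_neg ht, dif_neg hnil, if_neg hnil]
        have hpos : (0:Int) < xs.length := by
          exact_mod_cast List.length_pos_iff.mpr hnil
        have htpos : (0:Int) < t := by omega
        -- k = ceil(t / |xs|), so t ≤ k * |xs| and k ≥ 0
        set k : Int := -(PySem.Int.floordiv (-t) (xs.length : Int)) with hk
        have hkc : (k - 1) * xs.length < t ∧ t ≤ k * xs.length :=
          (PySem.Int.neg_floordiv_neg_eq_iff_of_pos hpos).mp hk.symm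
        have hk0 : 0 ≤ k := by nlinarith [hkc.1, hkc.2]
        obtain ⟨m, hm, hle⟩ := loopA_spec xs hnil t []
        rw [hm]
        rw [PySem.List.slice_to _ (le_of_lt htpos), PySem.List.slice_to _ (le_of_lt htpos)]
        simp only [List.nil_append]
        apply take_repeatN_eq
        · have h1 : t ≤ ((m * xs.length : Nat) : Int) := by push_cast; simpa using hle
          omega
        · have hc : ((k.toNat * xs.length : Nat) : Int) = k * (xs.length : Int) := by
            rw [Nat.cast_mul, Int.toNat_of_nonneg hk0]
          have h2 : t ≤ ((k.toNat * xs.length : Nat) : Int) := by rw [hc]; exact hkc.2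
          omega
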